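-- pv_equiv track=rewrite | github.com/Arttacker/CipherSecurity | encryption/classic/railfence.py | create_2d_array
-- ===== SOURCE A (Python) =====
-- def create_2d_array(text, n_columns, depth, method):
--     arr = [[' ' for _ in range(n_columns)] for _ in range(depth)]
--
--     if method == "row-wise":
--         text_pointer = 0
--         for col in range(n_columns):
--             for row in range(depth):
--                 if text_pointer < len(text):
--                     arr[row][col] = text[text_pointer]
--                     text_pointer += 1
--     elif method == "col-wise":
--         text_pointer = 0
--         for row in range(depth):
--             for col in range(n_columns):
--                 if text_pointer < len(text):
--                     arr[row][col] = text[text_pointer]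
--                     text_pointer += 1
--
--     return arr
-- ===== SOURCE B (Python) =====
-- def create_2d_array(text, n_columns, depth, method):
--     rows = max(depth, 0)
--     cols = max(n_columns, 0)
--     cap = rows * cols
--     if method == "col-wise":
--         padded = text[:cap].ljust(cap, ' ')
--         return [list(padded[r * cols:(r + 1) * cols]) for r in range(rows)]
--     if method == "row-wise":
--         padded = text[:cap].ljust(cap, ' ')
--         chunks = [padded[c * rows:(c + 1) * rows] for c in range(cols)]
--         return [[chunk[r] for chunk in chunks] for r in range(rows)]
--     return [[' '] * cols for _ in range(rows)]
-- ===== Notes on version B (the rewrite author's own statement) =====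
-- stated objective: alternative
-- what changed: B builds the grid by padding the text to grid capacity with spaces and slicing it into fixed-size chunks (rows for col-wise; columns then transposed for row-wise), instead of A's nested grid loops with a running text pointer.
import Mathlib
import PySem

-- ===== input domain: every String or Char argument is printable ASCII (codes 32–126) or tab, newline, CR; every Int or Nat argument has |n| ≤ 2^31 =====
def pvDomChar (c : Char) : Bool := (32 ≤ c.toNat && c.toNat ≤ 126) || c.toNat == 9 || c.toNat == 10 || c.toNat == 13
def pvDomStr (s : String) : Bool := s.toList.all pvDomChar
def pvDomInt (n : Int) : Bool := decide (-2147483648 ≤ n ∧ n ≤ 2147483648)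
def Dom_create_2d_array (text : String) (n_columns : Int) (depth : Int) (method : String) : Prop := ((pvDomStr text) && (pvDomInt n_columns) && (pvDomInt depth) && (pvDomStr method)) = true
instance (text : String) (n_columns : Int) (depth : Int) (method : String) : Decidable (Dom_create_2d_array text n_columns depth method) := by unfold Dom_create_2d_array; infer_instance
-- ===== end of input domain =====

-- B builds the grid by padding the text to capacity with spaces and slicing it into
-- fixed-size chunks (a transpose for the row-wise case), instead of A's nested
-- grid-mutation loops with a running text pointer (objective: alternative).

-- ===== PORT A =====
-- arr[row][col] = v  — exact here: row/col come from range loops, so they are nonnegative and in bounds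
def pvSet2 (g : List (List String)) (row col : Int) (v : String) : List (List String) :=
  g.set row.toNat ((g.getD row.toNat []).set col.toNat v)

def create_2d_array (text : String) (n_columns : Int) (depth : Int) (method : String) : List (List String) :=
  let arr := (PySem.List.pyRange 0 depth 1).map (fun _ => (PySem.List.pyRange 0 n_columns 1).map (fun _ => " "))
  if method == "row-wise" then
    -- text[text_pointer] is a 1-char string; the pointer is in [0, len(text)) at use, so pyGetD is exact
    (((PySem.List.pyRange 0 n_columns 1).foldl (fun (st : List (List String) × Int) col =>
        (PySem.List.pyRange 0 depth 1).foldl (fun st row =>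
          if st.2 < PySem.Str.len text then
            (pvSet2 st.1 row col (String.ofList [PySem.List.pyGetD text.toList st.2 ' ']), st.2 + 1)
          else st) st)
      (arr, 0))).1
  else if method == "col-wise" then
    (((PySem.List.pyRange 0 depth 1).foldl (fun (st : List (List String) × Int) row =>
        (PySem.List.pyRange 0 n_columns 1).foldl (fun st col =>
          if st.2 < PySem.Str.len text then
            (pvSet2 st.1 row col (String.ofList [PySem.List.pyGetD text.toList st.2 ' ']), st.2 + 1)
          else st) st)
      (arr, 0))).1
  else arr

-- ===== PORT B =====
-- Source B: max(k,0) is Int.toNat; text[:cap].ljust(cap,' ') with 0 ≤ cap is cs.take cap padded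
-- with spaces to length cap (exact); the slices padded[a:b] have 0 ≤ a ≤ b ≤ len(padded), so
-- they are (drop a).take (b-a); chunk[r] is in bounds (each chunk has length rows), so getD
-- is exact; list(s) over a string is the map to 1-char strings.
def create_2d_array_alt (text : String) (n_columns : Int) (depth : Int) (method : String) : List (List String) :=
  let cs := text.toList
  let rows := depth.toNat
  let cols := n_columns.toNat
  let cap := rows * cols
  if method == "col-wise" then
    let padded := cs.take cap ++ List.replicate (cap - cs.length) ' '
    (List.range rows).map (fun r =>
      ((padded.drop (r * cols)).take cols).map (fun ch => String.ofList [ch]))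
  else if method == "row-wise" then
    let padded := cs.take cap ++ List.replicate (cap - cs.length) ' '
    let chunks := (List.range cols).map (fun c => (padded.drop (c * rows)).take rows)
    (List.range rows).map (fun r => chunks.map (fun chunk => String.ofList [chunk.getD r ' ']))
  else
    (List.range rows).map (fun _ => List.replicate cols " ")

-- ===== PRECONDITION & SPEC =====
def Spec_create_2d_array (text : String) (n_columns : Int) (depth : Int) (method : String) (out : List (List String)) : Prop := out = create_2d_array_alt text n_columns depth method
instance (text : String) (n_columns : Int) (depth : Int) (method : String) (out : List (List String)) : Decidable (Spec_create_2d_array text n_columns depth method out) := by unfold Spec_create_2d_array; infer_instance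

-- ===== CLAIM (what is proved, stated in full; the proofs are below) =====
def Claim_equal_create_2d_array : Prop := ∀ (text : String) (n_columns : Int) (depth : Int) (method : String), Dom_create_2d_array text n_columns depth method → Spec_create_2d_array text n_columns depth method (create_2d_array text n_columns depth method)

-- ===== LEMMAS AND PROOFS =====

-- generic grid built from a coordinate function
def pvG (d m : Nat) (f : Nat → Nat → String) : List (List String) :=
  (List.range d).map (fun r => (List.range m).map (fun c => f r c))

theorem pvG_congr (d m : Nat) (f g : Nat → Nat → String)
    (h : ∀ r c, r < d → c < m → f r c = g r c) : pvG d m f = pvG d m g := by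
  unfold pvG
  apply List.map_congr_left
  intro r hr
  apply List.map_congr_left
  intro c hc
  exact h r c (List.mem_range.mp hr) (List.mem_range.mp hc)

theorem pvSet2_pvG (d m r c : Nat) (hr : r < d) (_hc : c < m) (f : Nat → Nat → String) (v : String) :
    pvSet2 (pvG d m f) (↑r) (↑c) v
      = pvG d m (fun r' c' => if r' = r ∧ c' = c then v else f r' c') := by
  unfold pvSet2 pvG
  simp only [Int.toNat_natCast]
  have hgetD : (((List.range d).map (fun r => (List.range m).map (fun c => f r c))).getD r [])
      = (List.range m).map (fun c => f r c) := by
    rw [List.getD_eq_getElem _ _ (by simpa using hr)]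
    simp
  rw [hgetD]
  apply List.ext_getElem
  · simp
  · intro i hi1 hi2
    rw [List.getElem_set]
    by_cases hir : r = i
    · subst hir
      rw [if_pos (by trivial)]
      apply List.ext_getElem
      · simp
      · intro j hj1 hj2
        rw [List.getElem_set]
        simp only [List.getElem_map, List.getElem_range]
        by_cases hjc : c = j
        · subst hjc
          simp
        · rw [if_neg hjc, if_neg (by tauto)]
    · rw [if_neg hir]
      simp only [List.getElem_map, List.getElem_range]
      apply List.map_congr_left
      intro x _
      rw [if_neg]
      rintro ⟨h, _⟩
      exact hir (by omega)

-- invariant rule for a fold over List.range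
theorem pvFoldInv {σ : Type} (f : σ → Nat → σ) (P : Nat → σ → Prop) :
    ∀ (k : Nat) (init : σ), P 0 init → (∀ i s, i < k → P i s → P (i + 1) (f s i)) →
      P k ((List.range k).foldl f init) := by
  intro k
  induction k with
  | zero => intro init h0 _; simpa using h0
  | succ k ih =>
    intro init h0 hstep
    rw [List.range_succ, List.foldl_append]
    exact hstep k _ (Nat.lt_succ_self k) (ih init h0 (fun i s hi => hstep i s (Nat.lt_succ_of_lt hi)))

-- rewrite a fold over pyRange 0 b 1 as a fold over List.range b.toNat
theorem pvFoldPyRange {σ : Type} (b : Int) (f : σ → Int → σ) (init : σ) :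
    (PySem.List.pyRange 0 b 1).foldl f init
      = (List.range b.toNat).foldl (fun s (k : Nat) => f s (↑k)) init := by
  rw [PySem.List.pyRange_one, List.foldl_map]
  simp only [Int.sub_zero, zero_add]

theorem pvMapPyRange {α : Type} (b : Int) (x : α) :
    (PySem.List.pyRange 0 b 1).map (fun _ => x) = (List.range b.toNat).map (fun _ => x) := by
  rw [PySem.List.pyRange_one]
  simp [List.map_map, Function.comp_def]

theorem pvInit (b1 b2 : Int) :
    (PySem.List.pyRange 0 b1 1).map (fun _ => (PySem.List.pyRange 0 b2 1).map (fun _ => " "))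
      = pvG b1.toNat b2.toNat (fun _ _ => " ") := by
  unfold pvG
  rw [pvMapPyRange]
  apply List.map_congr_left
  intro x _
  rw [pvMapPyRange]

-- the inner (row) fold of the row-wise branch, at a fixed column c
theorem pvInnerRW (cs : List Char) (d m c : Nat) (hc : c < m) :
    (List.range d).foldl (fun (st : List (List String) × Int) (r : Nat) =>
        if st.2 < (cs.length : Int) then
          (pvSet2 st.1 (↑r) (↑c) (String.ofList [PySem.List.pyGetD cs st.2 ' ']), st.2 + 1)
        else st)
      (pvG d m (fun r' c' => if c' < c ∧ c' * d + r' < cs.length then String.ofList [cs.getD (c' * d + r') ' '] else " "),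
       (↑(min cs.length (c * d)) : Int))
    = (pvG d m (fun r' c' => if (c' < c ∨ (c' = c ∧ r' < d)) ∧ c' * d + r' < cs.length then String.ofList [cs.getD (c' * d + r') ' '] else " "),
       (↑(min cs.length (c * d + d)) : Int)) := by
  refine pvFoldInv _ (fun r st =>
    st = (pvG d m (fun r' c' => if (c' < c ∨ (c' = c ∧ r' < r)) ∧ c' * d + r' < cs.length then String.ofList [cs.getD (c' * d + r') ' '] else " "),
          (↑(min cs.length (c * d + r)) : Int))) d _ ?_ ?_
  · dsimp only
    rw [Prod.mk.injEq]
    refine ⟨pvG_congr _ _ _ _ ?_, by omega⟩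
    intro r' c' _ _
    by_cases h : c' < c ∧ c' * d + r' < cs.length
    · rw [if_pos h, if_pos ⟨Or.inl h.1, h.2⟩]
    · rw [if_neg h, if_neg ?_]
      rintro ⟨hA | ⟨_, h0⟩, hidx⟩
      · exact h ⟨hA, hidx⟩
      · exact absurd h0 (Nat.not_lt_zero _)
  · intro r st hr hP
    subst hP
    try dsimp only
    by_cases hlt : (↑(min cs.length (c * d + r)) : Int) < (cs.length : Int)
    · have hidx : c * d + r < cs.length := by omega
      have hmin : min cs.length (c * d + r) = c * d + r := by omega
      rw [if_pos hlt, hmin, PySem.List.pyGetD_natCast, pvSet2_pvG d m r c hr hc]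
      rw [Prod.mk.injEq]
      refine ⟨pvG_congr _ _ _ _ ?_, by omega⟩
      intro r' c' _ _
      by_cases he : r' = r ∧ c' = c
      · obtain ⟨h1, h2⟩ := he; subst h1; subst h2
        rw [if_pos ⟨rfl, rfl⟩, if_pos ⟨Or.inr ⟨rfl, by omega⟩, hidx⟩, List.getD_eq_getElem _ _ hidx]
      · rw [if_neg he]
        by_cases h : (c' < c ∨ (c' = c ∧ r' < r)) ∧ c' * d + r' < cs.length
        · rw [if_pos h, if_pos ⟨h.1.imp id (fun hh => ⟨hh.1, by omega⟩), h.2⟩]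
        · rw [if_neg h, if_neg ?_]
          rintro ⟨hc2 | ⟨hceq, hrlt⟩, hidx2⟩
          · exact h ⟨Or.inl hc2, hidx2⟩
          · rcases Nat.lt_succ_iff_lt_or_eq.mp hrlt with hh | hh
            · exact h ⟨Or.inr ⟨hceq, hh⟩, hidx2⟩
            · exact he ⟨hh, hceq⟩
    · have hge : cs.length ≤ c * d + r := by omega
      rw [if_neg hlt, Prod.mk.injEq]
      refine ⟨pvG_congr _ _ _ _ ?_, by omega⟩
      intro r' c' _ _
      by_cases h : (c' < c ∨ (c' = c ∧ r' < r)) ∧ c' * d + r' < cs.length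
      · rw [if_pos h, if_pos ⟨h.1.imp id (fun hh => ⟨hh.1, by omega⟩), h.2⟩]
      · rw [if_neg h, if_neg ?_]
        rintro ⟨hA, hidx⟩
        refine h ⟨?_, hidx⟩
        rcases hA with hA | ⟨hceq, _⟩
        · exact Or.inl hA
        · subst hceq
          exact Or.inr ⟨rfl, by omega⟩

-- the inner (column) fold of the col-wise branch, at a fixed row r
theorem pvInnerCW (cs : List Char) (d m r : Nat) (hr : r < d) :
    (List.range m).foldl (fun (st : List (List String) × Int) (c : Nat) =>
        if st.2 < (cs.length : Int) then
          (pvSet2 st.1 (↑r) (↑c) (String.ofList [PySem.List.pyGetD cs st.2 ' ']), st.2 + 1)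
        else st)
      (pvG d m (fun r' c' => if r' < r ∧ r' * m + c' < cs.length then String.ofList [cs.getD (r' * m + c') ' '] else " "),
       (↑(min cs.length (r * m)) : Int))
    = (pvG d m (fun r' c' => if (r' < r ∨ (r' = r ∧ c' < m)) ∧ r' * m + c' < cs.length then String.ofList [cs.getD (r' * m + c') ' '] else " "),
       (↑(min cs.length (r * m + m)) : Int)) := by
  refine pvFoldInv _ (fun c st =>
    st = (pvG d m (fun r' c' => if (r' < r ∨ (r' = r ∧ c' < c)) ∧ r' * m + c' < cs.length then String.ofList [cs.getD (r' * m + c') ' '] else " "),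
          (↑(min cs.length (r * m + c)) : Int))) m _ ?_ ?_
  · dsimp only
    rw [Prod.mk.injEq]
    refine ⟨pvG_congr _ _ _ _ ?_, by omega⟩
    intro r' c' _ _
    by_cases h : r' < r ∧ r' * m + c' < cs.length
    · rw [if_pos h, if_pos ⟨Or.inl h.1, h.2⟩]
    · rw [if_neg h, if_neg ?_]
      rintro ⟨hA | ⟨_, h0⟩, hidx⟩
      · exact h ⟨hA, hidx⟩
      · exact absurd h0 (Nat.not_lt_zero _)
  · intro c st hcm hP
    subst hP
    try dsimp only
    by_cases hlt : (↑(min cs.length (r * m + c)) : Int) < (cs.length : Int)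
    · have hidx : r * m + c < cs.length := by omega
      have hmin : min cs.length (r * m + c) = r * m + c := by omega
      rw [if_pos hlt, hmin, PySem.List.pyGetD_natCast, pvSet2_pvG d m r c hr hcm]
      rw [Prod.mk.injEq]
      refine ⟨pvG_congr _ _ _ _ ?_, by omega⟩
      intro r' c' _ _
      by_cases he : r' = r ∧ c' = c
      · obtain ⟨h1, h2⟩ := he; subst h1; subst h2
        rw [if_pos ⟨rfl, rfl⟩, if_pos ⟨Or.inr ⟨rfl, by omega⟩, hidx⟩, List.getD_eq_getElem _ _ hidx]
      · rw [if_neg he]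
        by_cases h : (r' < r ∨ (r' = r ∧ c' < c)) ∧ r' * m + c' < cs.length
        · rw [if_pos h, if_pos ⟨h.1.imp id (fun hh => ⟨hh.1, by omega⟩), h.2⟩]
        · rw [if_neg h, if_neg ?_]
          rintro ⟨hc2 | ⟨hceq, hrlt⟩, hidx2⟩
          · exact h ⟨Or.inl hc2, hidx2⟩
          · rcases Nat.lt_succ_iff_lt_or_eq.mp hrlt with hh | hh
            · exact h ⟨Or.inr ⟨hceq, hh⟩, hidx2⟩
            · exact he ⟨hceq, hh⟩
    · have hge : cs.length ≤ r * m + c := by omega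
      rw [if_neg hlt, Prod.mk.injEq]
      refine ⟨pvG_congr _ _ _ _ ?_, by omega⟩
      intro r' c' _ _
      by_cases h : (r' < r ∨ (r' = r ∧ c' < c)) ∧ r' * m + c' < cs.length
      · rw [if_pos h, if_pos ⟨h.1.imp id (fun hh => ⟨hh.1, by omega⟩), h.2⟩]
      · rw [if_neg h, if_neg ?_]
        rintro ⟨hA, hidx⟩
        refine h ⟨?_, hidx⟩
        rcases hA with hA | ⟨hceq, _⟩
        · exact Or.inl hA
        · subst hceq
          exact Or.inr ⟨rfl, by omega⟩

theorem pvRowWise (cs : List Char) (d m : Nat) :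
    ((List.range m).foldl (fun (st : List (List String) × Int) (c : Nat) =>
        (List.range d).foldl (fun st (r : Nat) =>
          if st.2 < (cs.length : Int) then
            (pvSet2 st.1 (↑r) (↑c) (String.ofList [PySem.List.pyGetD cs st.2 ' ']), st.2 + 1)
          else st) st)
      (pvG d m (fun _ _ => " "), 0)).1
    = pvG d m (fun r c => if c * d + r < cs.length then String.ofList [cs.getD (c * d + r) ' '] else " ") := by
  have hmain : ((List.range m).foldl (fun (st : List (List String) × Int) (c : Nat) =>
        (List.range d).foldl (fun st (r : Nat) =>
          if st.2 < (cs.length : Int) then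
            (pvSet2 st.1 (↑r) (↑c) (String.ofList [PySem.List.pyGetD cs st.2 ' ']), st.2 + 1)
          else st) st)
      (pvG d m (fun _ _ => " "), 0))
      = (pvG d m (fun r' c' => if c' < m ∧ c' * d + r' < cs.length then String.ofList [cs.getD (c' * d + r') ' '] else " "),
         (↑(min cs.length (m * d)) : Int)) := by
    refine pvFoldInv _ (fun c st =>
      st = (pvG d m (fun r' c' => if c' < c ∧ c' * d + r' < cs.length then String.ofList [cs.getD (c' * d + r') ' '] else " "),
            (↑(min cs.length (c * d)) : Int))) m _ ?_ ?_
    · dsimp only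
      rw [Prod.mk.injEq]
      refine ⟨pvG_congr _ _ _ _ ?_, by omega⟩
      intro r' c' _ _
      rw [if_neg (fun hh => Nat.not_lt_zero _ hh.1)]
    · intro c st hc hP
      subst hP
      try dsimp only
      rw [pvInnerRW cs d m c hc, Prod.mk.injEq]
      have hd : (c + 1) * d = c * d + d := by ring
      refine ⟨pvG_congr _ _ _ _ ?_, by rw [hd]⟩
      intro r' c' hr' _
      by_cases h : (c' < c ∨ (c' = c ∧ r' < d)) ∧ c' * d + r' < cs.length
      · rw [if_pos h, if_pos ⟨by rcases h.1 with hh | ⟨hh, _⟩ <;> omega, h.2⟩]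
      · rw [if_neg h, if_neg ?_]
        rintro ⟨hlt2, hidx⟩
        refine h ⟨?_, hidx⟩
        rcases Nat.lt_succ_iff_lt_or_eq.mp hlt2 with hh | hh
        · exact Or.inl hh
        · exact Or.inr ⟨hh, hr'⟩
  rw [hmain]
  apply pvG_congr
  intro r c _ hc
  by_cases h : c * d + r < cs.length
  · rw [if_pos ⟨hc, h⟩, if_pos h]
  · rw [if_neg (fun hh => h hh.2), if_neg h]

theorem pvColWise (cs : List Char) (d m : Nat) :
    ((List.range d).foldl (fun (st : List (List String) × Int) (r : Nat) =>
        (List.range m).foldl (fun st (c : Nat) =>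
          if st.2 < (cs.length : Int) then
            (pvSet2 st.1 (↑r) (↑c) (String.ofList [PySem.List.pyGetD cs st.2 ' ']), st.2 + 1)
          else st) st)
      (pvG d m (fun _ _ => " "), 0)).1
    = pvG d m (fun r c => if r * m + c < cs.length then String.ofList [cs.getD (r * m + c) ' '] else " ") := by
  have hmain : ((List.range d).foldl (fun (st : List (List String) × Int) (r : Nat) =>
        (List.range m).foldl (fun st (c : Nat) =>
          if st.2 < (cs.length : Int) then
            (pvSet2 st.1 (↑r) (↑c) (String.ofList [PySem.List.pyGetD cs st.2 ' ']), st.2 + 1)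
          else st) st)
      (pvG d m (fun _ _ => " "), 0))
      = (pvG d m (fun r' c' => if r' < d ∧ r' * m + c' < cs.length then String.ofList [cs.getD (r' * m + c') ' '] else " "),
         (↑(min cs.length (d * m)) : Int)) := by
    refine pvFoldInv _ (fun r st =>
      st = (pvG d m (fun r' c' => if r' < r ∧ r' * m + c' < cs.length then String.ofList [cs.getD (r' * m + c') ' '] else " "),
            (↑(min cs.length (r * m)) : Int))) d _ ?_ ?_
    · dsimp only
      rw [Prod.mk.injEq]
      refine ⟨pvG_congr _ _ _ _ ?_, by omega⟩
      intro r' c' _ _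
      rw [if_neg (fun hh => Nat.not_lt_zero _ hh.1)]
    · intro r st hr hP
      subst hP
      try dsimp only
      rw [pvInnerCW cs d m r hr, Prod.mk.injEq]
      have hd : (r + 1) * m = r * m + m := by ring
      refine ⟨pvG_congr _ _ _ _ ?_, by rw [hd]⟩
      intro r' c' _ hc'
      by_cases h : (r' < r ∨ (r' = r ∧ c' < m)) ∧ r' * m + c' < cs.length
      · rw [if_pos h, if_pos ⟨by rcases h.1 with hh | ⟨hh, _⟩ <;> omega, h.2⟩]
      · rw [if_neg h, if_neg ?_]
        rintro ⟨hlt2, hidx⟩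
        refine h ⟨?_, hidx⟩
        rcases Nat.lt_succ_iff_lt_or_eq.mp hlt2 with hh | hh
        · exact Or.inl hh
        · exact Or.inr ⟨hh, hc'⟩
  rw [hmain]
  apply pvG_congr
  intro r c hr _
  by_cases h : r * m + c < cs.length
  · rw [if_pos ⟨hr, h⟩, if_pos h]
  · rw [if_neg (fun hh => h hh.2), if_neg h]

-- ===== B-side lemmas: padding and chunking =====

theorem pvPadded_length (cs : List Char) (cap : Nat) :
    (cs.take cap ++ List.replicate (cap - cs.length) ' ').length = cap := by
  simp [List.length_append, List.length_take, List.length_replicate]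
  omega

theorem pvPadded_getD (cs : List Char) (cap i : Nat) (hi : i < cap) :
    (cs.take cap ++ List.replicate (cap - cs.length) ' ').getD i ' '
      = if i < cs.length then cs.getD i ' ' else ' ' := by
  by_cases h : i < cs.length
  · rw [if_pos h]
    have hlt : i < (cs.take cap).length := by
      simp [List.length_take]; omega
    rw [List.getD_eq_getElem _ _ (by rw [List.length_append]; omega),
        List.getElem_append_left hlt, List.getElem_take,
        List.getD_eq_getElem _ _ h]
  · rw [if_neg h]
    have hlen : (cs.take cap).length = cs.length := by
      simp [List.length_take]; omega
    rw [List.getD_eq_getElem _ _ (by rw [List.length_append, hlen, List.length_replicate]; omega)]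
    rw [List.getElem_append_right (by omega)]
    simp

theorem pvChunk (l : List Char) (a b : Nat) (h : a + b ≤ l.length) :
    (l.drop a).take b = (List.range b).map (fun j => l.getD (a + j) ' ') := by
  apply List.ext_getElem
  · simp only [List.length_take, List.length_drop, List.length_map, List.length_range]
    omega
  · intro i hi1 hi2
    have hb : a + i < l.length := by
      simp only [List.length_take, List.length_drop] at hi1
      omega
    simp only [List.getElem_take, List.getElem_drop, List.getElem_map, List.getElem_range]
    rw [List.getD_eq_getElem _ _ hb]

theorem pvAltCW (cs : List Char) (d m : Nat) :
    ((List.range d).map (fun r =>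
      (((cs.take (d * m) ++ List.replicate (d * m - cs.length) ' ').drop (r * m)).take m).map
        (fun ch => String.ofList [ch])))
    = pvG d m (fun r c => if r * m + c < cs.length then String.ofList [cs.getD (r * m + c) ' '] else " ") := by
  unfold pvG
  apply List.map_congr_left
  intro r hr
  have hr' : r < d := List.mem_range.mp hr
  rw [pvChunk _ (r * m) m (by rw [pvPadded_length]; nlinarith)]
  rw [List.map_map]
  apply List.map_congr_left
  intro c hc
  have hc' : c < m := List.mem_range.mp hc
  simp only [Function.comp_def]
  rw [pvPadded_getD cs (d * m) (r * m + c) (by nlinarith)]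
  by_cases h : r * m + c < cs.length
  · rw [if_pos h, if_pos h]
  · rw [if_neg h, if_neg h]

theorem pvAltRW (cs : List Char) (d m : Nat) :
    ((List.range d).map (fun r =>
      (((List.range m).map (fun c => ((cs.take (d * m) ++ List.replicate (d * m - cs.length) ' ').drop (c * d)).take d)).map
        (fun chunk => String.ofList [chunk.getD r ' ']))))
    = pvG d m (fun r c => if c * d + r < cs.length then String.ofList [cs.getD (c * d + r) ' '] else " ") := by
  unfold pvG
  apply List.map_congr_left
  intro r hr
  have hr' : r < d := List.mem_range.mp hr
  rw [List.map_map]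
  apply List.map_congr_left
  intro c hc
  have hc' : c < m := List.mem_range.mp hc
  simp only [Function.comp_def]
  rw [pvChunk _ (c * d) d (by rw [pvPadded_length]; nlinarith)]
  have hget : ((List.range d).map (fun j => (cs.take (d * m) ++ List.replicate (d * m - cs.length) ' ').getD (c * d + j) ' ')).getD r ' '
      = (cs.take (d * m) ++ List.replicate (d * m - cs.length) ' ').getD (c * d + r) ' ' := by
    rw [List.getD_eq_getElem _ _ (by simpa using hr')]
    simp
  rw [hget, pvPadded_getD cs (d * m) (c * d + r) (by nlinarith)]
  by_cases h : c * d + r < cs.length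
  · rw [if_pos h, if_pos h]
  · rw [if_neg h, if_neg h]

theorem pvAltElse (d m : Nat) :
    (List.range d).map (fun _ => List.replicate m " ") = pvG d m (fun _ _ => " ") := by
  unfold pvG
  apply List.map_congr_left
  intro _ _
  apply List.ext_getElem <;> simp

-- ===== VERDICT (by name: the statement is the Claim_ definition above) =====
theorem create_2d_array_spec : Claim_equal_create_2d_array := by
  intro text n_columns depth method _
  unfold Spec_create_2d_array create_2d_array create_2d_array_alt
  simp only [pvInit, pvFoldPyRange, PySem.Str.len_eq]
  by_cases h1 : method == "row-wise"
  · have hne : ¬ (method == "col-wise") := by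
      simp only [beq_iff_eq] at h1 ⊢; subst h1; decide
    rw [if_pos h1, if_neg hne, if_pos h1]
    exact (pvRowWise text.toList depth.toNat n_columns.toNat).trans
      (pvAltRW text.toList depth.toNat n_columns.toNat).symm
  · rw [if_neg h1]
    by_cases h2 : method == "col-wise"
    · rw [if_pos h2, if_pos h2]
      exact (pvColWise text.toList depth.toNat n_columns.toNat).trans
        (pvAltCW text.toList depth.toNat n_columns.toNat).symm
    · rw [if_neg h2, if_neg h2, if_neg h1]
      exact (pvAltElse depth.toNat n_columns.toNat).symm
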